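-- pv_equiv track=rewrite | github.com/integraledelebesgue/quantum-diffusion | packages/quantum-image-encoding/src/quantum_image_encoding/real_ket.py | _position_to_morton_code
-- ===== SOURCE A (Python) =====
-- def _position_to_morton_code(row: int, column: int, n_rows: int, n_columns: int) -> int:
--     """Translate the row-column position to a corresponding index in Morton code.
--     Uses least-significant-bit-first layout (c0, r0, c1, r1, ...).
--     """
--
--     result = 0
--     bit_pos = 0
--
--     for i in range(max(n_rows, n_columns)):
--         if i < n_columns:
--             result |= ((column >> i) & 1) << bit_pos
--             bit_pos += 1
--         if i < n_rows:
--             result |= ((row >> i) & 1) << bit_pos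
--             bit_pos += 1
--
--     return result
-- ===== SOURCE B (Python) =====
-- def _position_to_morton_code(row: int, column: int, n_rows: int, n_columns: int) -> int:
--     """MSB-first Horner accumulation: scan bit indices downward and grow the
--     code arithmetically (base 4 while both coordinates are active, base 2 on
--     the longer coordinate's packed tail); no bit-position cursor, no ORs."""
--     result = 0
--     i = max(n_rows, n_columns)
--     while i > 0:
--         i -= 1
--         if i < n_rows and i < n_columns:
--             result = result * 4 + ((row >> i) & 1) * 2 + ((column >> i) & 1)
--         elif i < n_rows:
--             result = result * 2 + ((row >> i) & 1)
--         elif i < n_columns: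
--             result = result * 2 + ((column >> i) & 1)
--     return result
-- ===== Notes on version B (the rewrite author's own statement) =====
-- stated objective: alternative
-- what changed: Replaces A's LSB-first loop that ORs each bit into the result at a maintained bit_pos cursor by an MSB-first Horner accumulation: scan indices downward and grow the code arithmetically (result*4 + 2*rowbit + colbit in the interleaved region, result*2 + bit on the packed tail), with no bit-position state and no bitwise operations on the accumulator.
import Mathlib
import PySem

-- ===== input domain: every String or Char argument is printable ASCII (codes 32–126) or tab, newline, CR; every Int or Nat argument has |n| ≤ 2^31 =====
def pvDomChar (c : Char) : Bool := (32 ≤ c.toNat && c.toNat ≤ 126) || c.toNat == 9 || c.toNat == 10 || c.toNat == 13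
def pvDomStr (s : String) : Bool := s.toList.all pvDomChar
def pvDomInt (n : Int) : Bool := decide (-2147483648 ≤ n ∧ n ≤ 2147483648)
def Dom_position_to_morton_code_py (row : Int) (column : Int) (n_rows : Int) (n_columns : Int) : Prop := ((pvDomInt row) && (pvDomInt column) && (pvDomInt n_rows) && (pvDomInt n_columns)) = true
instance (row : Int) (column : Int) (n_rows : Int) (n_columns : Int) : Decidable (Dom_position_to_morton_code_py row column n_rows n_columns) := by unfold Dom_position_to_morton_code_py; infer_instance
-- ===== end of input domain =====

-- B replaces A's LSB-first positional-OR loop (with a bit_pos cursor) by an MSB-first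
-- Horner accumulation with no bit cursor and no bitwise ORs (alternative decomposition, same cost).

-- ===== PORT A =====
-- (v >> i) & 1 ; shift amounts are always nonnegative at run time
def pvBit (v : Int) (i : Int) : Int := PySem.Int.band (v >>> i.toNat) 1

-- loop body of A: state = (result, bit_pos)
def pvStepA (row column n_rows n_columns : Int) (st : Int × Int) (i : Int) : Int × Int :=
  let st := if i < n_columns then (PySem.Int.bor st.1 (pvBit column i <<< st.2.toNat), st.2 + 1) else st
  if i < n_rows then (PySem.Int.bor st.1 (pvBit row i <<< st.2.toNat), st.2 + 1) else st

def position_to_morton_code_py (row : Int) (column : Int) (n_rows : Int) (n_columns : Int) : Int :=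
  ((PySem.List.pyRange 0 (max n_rows n_columns) 1).foldl
    (pvStepA row column n_rows n_columns) (0, 0)).1

-- ===== PORT B =====
-- Source B's while-loop: i counts down from max(n_rows, n_columns) to 0; the fuel IS i.
def pvHorner (row column n_rows n_columns : Int) : Nat → Int → Int
  | 0, result => result
  | Nat.succ k, result =>
      let i : Int := (k : Int)
      let result :=
        if i < n_rows ∧ i < n_columns then result * 4 + pvBit row i * 2 + pvBit column i
        else if i < n_rows then result * 2 + pvBit row i
        else if i < n_columns then result * 2 + pvBit column i
        else result
      pvHorner row column n_rows n_columns k result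

def position_to_morton_code_py_alt (row : Int) (column : Int) (n_rows : Int) (n_columns : Int) : Int :=
  pvHorner row column n_rows n_columns (max n_rows n_columns).toNat 0

-- ===== PRECONDITION & SPEC =====
def Spec_position_to_morton_code_py (row : Int) (column : Int) (n_rows : Int) (n_columns : Int) (out : Int) : Prop := out = position_to_morton_code_py_alt row column n_rows n_columns
instance (row : Int) (column : Int) (n_rows : Int) (n_columns : Int) (out : Int) : Decidable (Spec_position_to_morton_code_py row column n_rows n_columns out) := by unfold Spec_position_to_morton_code_py; infer_instance

-- ===== CLAIM (what is proved, stated in full; the proofs are below) =====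
def Claim_equal_position_to_morton_code_py : Prop := ∀ (row : Int) (column : Int) (n_rows : Int) (n_columns : Int), Dom_position_to_morton_code_py row column n_rows n_columns → Spec_position_to_morton_code_py row column n_rows n_columns (position_to_morton_code_py row column n_rows n_columns)

-- ===== LEMMAS AND PROOFS =====

-- number of output bits emitted at index i (0, 1 or 2)
def pvBC (n_rows n_columns : Int) (i : Int) : Nat :=
  (if i < n_rows then 1 else 0) + (if i < n_columns then 1 else 0)

-- number of output bits emitted at indices < k (A's bit_pos after k iterations)
def pvBits (n_rows n_columns : Int) : Nat → Nat
  | 0 => 0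
  | Nat.succ k => pvBits n_rows n_columns k + pvBC n_rows n_columns (k : Int)

theorem pvBit_bounds (v i : Int) : 0 ≤ pvBit v i ∧ pvBit v i < 2 := by
  unfold pvBit
  rw [PySem.Int.band_one]
  exact ⟨PySem.Int.mod_nonneg _ (by norm_num), PySem.Int.mod_lt _ (by norm_num)⟩

-- a ||| (b·2^p) = a + b·2^p for a < 2^p (disjoint bits), over Nat
theorem pv_nat_lor_disj : ∀ (p a b : Nat), a < 2 ^ p → a ||| (b * 2 ^ p) = a + b * 2 ^ p := by
  intro p
  induction p with
  | zero =>
    intro a b h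
    have ha : a = 0 := by omega
    subst ha
    simp
  | succ p ih =>
    intro a b h
    have hp : 2 ^ (p + 1) = 2 * 2 ^ p := by ring
    have h2 : a / 2 < 2 ^ p := by omega
    have e1 : a ||| b * 2 ^ (p + 1)
        = Nat.bit (decide (a % 2 = 1)) (a >>> 1) ||| Nat.bit false (b * 2 ^ p) := by
      rw [Nat.bit_decide_mod_two_eq_one_shiftRight_one]
      congr 1
      rw [Nat.bit_false_apply]
      ring
    rw [e1, Nat.lor_bit, Nat.shiftRight_one, ih (a / 2) b h2, Nat.bit_val]
    have hq : b * 2 ^ (p + 1) = 2 * (b * 2 ^ p) := by ring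
    have ht : (decide (a % 2 = 1) || false).toNat = a % 2 := by
      rcases Nat.mod_two_eq_zero_or_one a with h0 | h0 <;> simp [h0]
    rw [hq, ht]
    omega

-- the same over Int, in the exact shape A's |= step produces
theorem pv_bor_add (r x : Int) (p : Nat) (h0 : 0 ≤ r) (hr : r < 2 ^ p) (hx : 0 ≤ x) :
    PySem.Int.bor r (x <<< p) = r + x * 2 ^ p := by
  lift r to ℕ using h0 with rn
  lift x to ℕ using hx with xn
  rw [Int.shiftLeft_eq]
  have hcast : (xn : Int) * 2 ^ p = ((xn * 2 ^ p : Nat) : Int) := by push_cast; ring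
  rw [hcast, PySem.Int.bor_natCast]
  have hrn : rn < 2 ^ p := by exact_mod_cast hr
  rw [pv_nat_lor_disj p rn xn hrn]
  push_cast
  ring

-- Horner is linear in its accumulator, with weight 2^(bits emitted by the remaining fuel)
theorem pvHorner_linear (row column n_rows n_columns : Int) :
    ∀ (k : Nat) (r : Int), pvHorner row column n_rows n_columns k r
      = r * 2 ^ pvBits n_rows n_columns k + pvHorner row column n_rows n_columns k 0 := by
  intro k
  induction k with
  | zero => intro r; simp [pvHorner, pvBits]
  | succ k ih =>
    intro r
    have hbits : pvBits n_rows n_columns (k + 1)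
        = pvBits n_rows n_columns k + pvBC n_rows n_columns (k : Int) := rfl
    by_cases h1 : (k : Int) < n_rows <;> by_cases h2 : (k : Int) < n_columns
    · simp only [pvHorner, h1, h2, and_self, if_true]
      rw [ih]
      conv_rhs => rw [ih]
      rw [hbits, show pvBC n_rows n_columns (k : Int) = 2 from by simp [pvBC, h1, h2], pow_add]
      ring
    · simp only [pvHorner, h1, h2, and_false, if_false, if_true]
      rw [ih]
      conv_rhs => rw [ih]
      rw [hbits, show pvBC n_rows n_columns (k : Int) = 1 from by simp [pvBC, h1, h2], pow_add]
      ring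
    · simp only [pvHorner, h1, h2, false_and, if_false, if_true, if_neg, not_false_iff]
      rw [ih]
      conv_rhs => rw [ih]
      rw [hbits, show pvBC n_rows n_columns (k : Int) = 1 from by simp [pvBC, h1, h2], pow_add]
      ring
    · simp only [pvHorner, h1, h2, false_and, if_false, if_neg, not_false_iff]
      rw [ih]
      conv_rhs => rw [ih]
      rw [hbits, show pvBC n_rows n_columns (k : Int) = 0 from by simp [pvBC, h1, h2], pow_add]
      ring

theorem pvHorner_zero_bounds (row column n_rows n_columns : Int) :
    ∀ (k : Nat), 0 ≤ pvHorner row column n_rows n_columns k 0 ∧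
      pvHorner row column n_rows n_columns k 0 < 2 ^ pvBits n_rows n_columns k := by
  intro k
  induction k with
  | zero => simp [pvHorner, pvBits]
  | succ k ih =>
    obtain ⟨hV0, hVlt⟩ := ih
    obtain ⟨hr0, hr2⟩ := pvBit_bounds row (k : Int)
    obtain ⟨hc0, hc2⟩ := pvBit_bounds column (k : Int)
    have hP : (0 : Int) < 2 ^ pvBits n_rows n_columns k := by positivity
    have hbits : pvBits n_rows n_columns (k + 1)
        = pvBits n_rows n_columns k + pvBC n_rows n_columns (k : Int) := rfl
    by_cases h1 : (k : Int) < n_rows <;> by_cases h2 : (k : Int) < n_columns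
    · have hv : pvHorner row column n_rows n_columns (k + 1) 0
          = (0 * 4 + pvBit row (k : Int) * 2 + pvBit column (k : Int))
              * 2 ^ pvBits n_rows n_columns k + pvHorner row column n_rows n_columns k 0 := by
        simp only [pvHorner, h1, h2, and_self, if_true]
        rw [pvHorner_linear]
      rw [hv, hbits, show pvBC n_rows n_columns (k : Int) = 2 from by simp [pvBC, h1, h2], pow_add]
      constructor
      · nlinarith
      · nlinarith [mul_le_mul_of_nonneg_right
          (show 0 * 4 + pvBit row (k : Int) * 2 + pvBit column (k : Int) ≤ 3 by omega) hP.le]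
    · have hv : pvHorner row column n_rows n_columns (k + 1) 0
          = (0 * 2 + pvBit row (k : Int))
              * 2 ^ pvBits n_rows n_columns k + pvHorner row column n_rows n_columns k 0 := by
        simp only [pvHorner, h1, h2, and_false, if_false, if_true]
        rw [pvHorner_linear]
      rw [hv, hbits, show pvBC n_rows n_columns (k : Int) = 1 from by simp [pvBC, h1, h2], pow_add]
      constructor
      · nlinarith
      · nlinarith [mul_le_mul_of_nonneg_right
          (show 0 * 2 + pvBit row (k : Int) ≤ 1 by omega) hP.le]
    · have hv : pvHorner row column n_rows n_columns (k + 1) 0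
          = (0 * 2 + pvBit column (k : Int))
              * 2 ^ pvBits n_rows n_columns k + pvHorner row column n_rows n_columns k 0 := by
        simp only [pvHorner, h1, h2, false_and, if_false, if_true, if_neg, not_false_iff]
        rw [pvHorner_linear]
      rw [hv, hbits, show pvBC n_rows n_columns (k : Int) = 1 from by simp [pvBC, h1, h2], pow_add]
      constructor
      · nlinarith
      · nlinarith [mul_le_mul_of_nonneg_right
          (show 0 * 2 + pvBit column (k : Int) ≤ 1 by omega) hP.le]
    · have hv : pvHorner row column n_rows n_columns (k + 1) 0
          = pvHorner row column n_rows n_columns k 0 := by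
        simp only [pvHorner, h1, h2, false_and, if_false, if_neg, not_false_iff]
      rw [hv, hbits, show pvBC n_rows n_columns (k : Int) = 0 from by simp [pvBC, h1, h2], pow_add]
      constructor
      · exact hV0
      · nlinarith

-- A's loop over range(k), started at (0,0), lands exactly on (Horner value, bit count)
theorem pv_foldA (row column n_rows n_columns : Int) :
    ∀ (k : Nat), (PySem.List.pyRange 0 (k : Int) 1).foldl
        (pvStepA row column n_rows n_columns) (0, 0)
      = (pvHorner row column n_rows n_columns k 0, (pvBits n_rows n_columns k : Int)) := by
  intro k
  induction k with
  | zero =>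
    rw [PySem.List.pyRange_one_eq_nil (by norm_num)]
    simp [pvHorner, pvBits]
  | succ k ih =>
    have hcast : ((k + 1 : Nat) : Int) = (k : Int) + 1 := by push_cast; ring
    rw [hcast, PySem.List.pyRange_one_succ_right (Int.natCast_nonneg k), List.foldl_append, ih]
    simp only [List.foldl_cons, List.foldl_nil]
    obtain ⟨hV0, hVlt⟩ := pvHorner_zero_bounds row column n_rows n_columns k
    obtain ⟨hr0, hr2⟩ := pvBit_bounds row (k : Int)
    obtain ⟨hc0, hc2⟩ := pvBit_bounds column (k : Int)
    have hP : (0 : Int) < 2 ^ pvBits n_rows n_columns k := by positivity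
    set V := pvHorner row column n_rows n_columns k 0 with hVdef
    set b := pvBits n_rows n_columns k with hbdef
    have htn : ((b : Int)).toNat = b := Int.toNat_natCast b
    have htn1 : ((b : Int) + 1).toNat = b + 1 := by omega
    have hbits : pvBits n_rows n_columns (k + 1) = b + pvBC n_rows n_columns (k : Int) := by
      rw [hbdef]; rfl
    by_cases h1 : (k : Int) < n_rows <;> by_cases h2 : (k : Int) < n_columns
    · -- both coordinates active at index k
      have s1 : pvStepA row column n_rows n_columns (V, (b : Int)) (k : Int)
          = (V + pvBit column (k : Int) * 2 ^ b + pvBit row (k : Int) * 2 ^ (b + 1),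
             (b : Int) + 1 + 1) := by
        simp only [pvStepA, if_pos h1, if_pos h2]
        rw [htn]
        rw [pv_bor_add V (pvBit column (k : Int)) b hV0 hVlt hc0]
        rw [htn1]
        rw [pv_bor_add _ (pvBit row (k : Int)) (b + 1) (by positivity)
          (by have : pvBit column (k : Int) * 2 ^ b ≤ 1 * 2 ^ b :=
                mul_le_mul_of_nonneg_right (by omega) (by positivity)
              calc V + pvBit column (k : Int) * 2 ^ b < 2 ^ b + 1 * 2 ^ b := by omega
                _ = 2 ^ (b + 1) := by ring) hr0]
      have hrhs : pvHorner row column n_rows n_columns (k + 1) 0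
          = (0 * 4 + pvBit row (k : Int) * 2 + pvBit column (k : Int)) * 2 ^ b + V := by
        simp only [pvHorner, h1, h2, and_self, if_true]
        rw [pvHorner_linear, ← hbdef, ← hVdef]
      rw [s1, hrhs, hbits, show pvBC n_rows n_columns (k : Int) = 2 from by simp [pvBC, h1, h2]]
      simp only [Prod.mk.injEq]
      constructor
      · ring
      · push_cast; ring
    · -- only the row coordinate active
      have s1 : pvStepA row column n_rows n_columns (V, (b : Int)) (k : Int)
          = (V + pvBit row (k : Int) * 2 ^ b, (b : Int) + 1) := by
        simp only [pvStepA, if_pos h1, if_neg h2]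
        rw [htn, pv_bor_add V (pvBit row (k : Int)) b hV0 hVlt hr0]
      have hrhs : pvHorner row column n_rows n_columns (k + 1) 0
          = (0 * 2 + pvBit row (k : Int)) * 2 ^ b + V := by
        simp only [pvHorner, h1, h2, and_false, if_false, if_true]
        rw [pvHorner_linear, ← hbdef, ← hVdef]
      rw [s1, hrhs, hbits, show pvBC n_rows n_columns (k : Int) = 1 from by simp [pvBC, h1, h2]]
      simp only [Prod.mk.injEq]
      constructor
      · ring
      · push_cast; ring
    · -- only the column coordinate active
      have s1 : pvStepA row column n_rows n_columns (V, (b : Int)) (k : Int)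
          = (V + pvBit column (k : Int) * 2 ^ b, (b : Int) + 1) := by
        simp only [pvStepA, if_neg h1, if_pos h2]
        rw [htn, pv_bor_add V (pvBit column (k : Int)) b hV0 hVlt hc0]
      have hrhs : pvHorner row column n_rows n_columns (k + 1) 0
          = (0 * 2 + pvBit column (k : Int)) * 2 ^ b + V := by
        simp only [pvHorner, h1, h2, false_and, if_false, if_true, if_neg, not_false_iff]
        rw [pvHorner_linear, ← hbdef, ← hVdef]
      rw [s1, hrhs, hbits, show pvBC n_rows n_columns (k : Int) = 1 from by simp [pvBC, h1, h2]]
      simp only [Prod.mk.injEq]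
      constructor
      · ring
      · push_cast; ring
    · -- neither active: state unchanged
      have s1 : pvStepA row column n_rows n_columns (V, (b : Int)) (k : Int) = (V, (b : Int)) := by
        simp only [pvStepA, if_neg h1, if_neg h2]
      have hrhs : pvHorner row column n_rows n_columns (k + 1) 0 = V := by
        simp only [pvHorner, h1, h2, false_and, if_false, if_neg, not_false_iff]
        rw [← hVdef]
      rw [s1, hrhs, hbits, show pvBC n_rows n_columns (k : Int) = 0 from by simp [pvBC, h1, h2]]
      simp

-- ===== VERDICT (by name: the statement is the Claim_ definition above) =====
theorem position_to_morton_code_py_spec : Claim_equal_position_to_morton_code_py := by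
  intro row column n_rows n_columns _hdom
  unfold Spec_position_to_morton_code_py position_to_morton_code_py position_to_morton_code_py_alt
  by_cases hM : max n_rows n_columns ≤ 0
  · rw [PySem.List.pyRange_one_eq_nil hM]
    have : (max n_rows n_columns).toNat = 0 := by omega
    rw [this]
    simp [pvHorner]
  · have hM' : max n_rows n_columns = ((max n_rows n_columns).toNat : Int) := by omega
    rw [hM', pv_foldA]
    simp only [Int.toNat_natCast]
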